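-- pv_equiv track=rewrite | github.com/gauravtatke/codetinkering | dsnalgo/findmiddleelem_unsortedarray.py | findmiddleelem
-- ===== SOURCE A (Python) =====
-- def findmiddleelem(arr):
--     req_elem = -1
--     curr_max = -1
--     for i, num in enumerate(arr):
--         if i == 0 or i == len(arr) - 1:
--             # means first elem & last elem, cannot be req_elem
--             # just update the curr_max
--             curr_max = num
--         else:
--             if num >= curr_max:
--                 curr_max = num
--                 if req_elem == -1:
--                     # means no req_elem is found yet so this becomes the req elem
--                     # if req_elem not -1 then no need to do anything. just
--                     # iterate next elem
--                     req_elem = num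
--             else:
--                 # num is less than curr_max
--                 # check if is is less than req_elem. if so then update req_elem to -1
--                 # bcoz smaller elem can't appear on right of req_elem
--                 if num < req_elem:
--                     req_elem = -1
--     return req_elem
-- ===== SOURCE B (Python) =====
-- def findmiddleelem(arr):
--     n = len(arr)
--     if n < 3:
--         return -1
--     mid = arr[1:n - 1]
--     m = len(mid)
--     # backward pass: ok_right[i] <=> mid[i] <= every later middle element
--     ok_right = [False] * m
--     run_min = mid[m - 1]
--     ok_right[m - 1] = True
--     for i in range(m - 2, -1, -1):
--         ok_right[i] = mid[i] <= run_min
--         if mid[i] < run_min: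
--             run_min = mid[i]
--     # forward pass: first middle element >= every element before it
--     pmax = arr[0]
--     for i in range(m):
--         if mid[i] >= pmax and ok_right[i]:
--             return mid[i]
--         if mid[i] > pmax:
--             pmax = mid[i]
--     return -1
-- ===== Notes on version B (the rewrite author's own statement) =====
-- stated objective: alternative
-- what changed: Replaces A's fused single pass (running max plus candidate-with-reset logic built on a -1 sentinel) with a backward suffix-minimum pass over the interior elements and a forward prefix-maximum scan returning the first interior element that is >= its prefix max and <= every later interior element.
-- intended difference: On arrays whose first valid interior candidate equals -1 while a later valid candidate is not -1, A's use of -1 as its not-found sentinel makes it overlook the -1 candidate and return the later candidate (e.g. [-2,-1,3,5] -> 3), whereas B returns -1, the genuinely first valid candidate, which is the intended first-match behaviour. — e.g. on findmiddleelem([-2, -1, 3, 5]): A returns 3, B returns -1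
import Mathlib
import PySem

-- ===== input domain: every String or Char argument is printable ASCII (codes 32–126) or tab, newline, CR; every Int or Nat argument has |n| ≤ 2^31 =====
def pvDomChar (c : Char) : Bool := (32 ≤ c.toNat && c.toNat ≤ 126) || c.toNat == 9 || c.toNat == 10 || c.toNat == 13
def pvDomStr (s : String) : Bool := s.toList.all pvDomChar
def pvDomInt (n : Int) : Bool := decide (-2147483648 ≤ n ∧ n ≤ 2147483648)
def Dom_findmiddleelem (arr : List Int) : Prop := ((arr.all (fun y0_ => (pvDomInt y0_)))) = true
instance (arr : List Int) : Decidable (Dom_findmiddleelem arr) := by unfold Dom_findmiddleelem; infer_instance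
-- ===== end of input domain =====

-- B replaces A's fused stateful pass (running max + candidate-with-reset via a -1 sentinel) by a
-- backward suffix-minimum pass and a forward prefix-maximum scan (alternative decomposition, same O(n) cost).

-- ===== PORT A =====
def findmiddleelem (arr : List Int) : Int :=
  ((PySem.List.enumerate arr).foldl (fun st p =>
      if p.1 = 0 ∨ p.1 = (arr.length : Int) - 1 then (st.1, p.2)
      else if st.2 ≤ p.2 then (if st.1 = -1 then p.2 else st.1, p.2)
      else if p.2 < st.1 then (-1, st.2) else st) (-1, -1)).1

-- ===== PORT B =====
-- backward pass of Source B: flags ok_right (elem ≤ every later middle elem) together with the running min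
def okAux : List Int → List Bool × Int
  | [] => ([], 0)
  | [x] => ([true], x)
  | x :: y :: rest =>
    let p := okAux (y :: rest)
    ((decide (x ≤ p.2)) :: p.1, if x < p.2 then x else p.2)

-- forward pass of Source B: first middle elem ≥ the running prefix max whose ok_right flag is set
def scanB (pmax : Int) : List Int → List Bool → Int
  | [], _ => -1
  | _ :: _, [] => -1
  | x :: xs, b :: bs =>
    if pmax ≤ x ∧ b = true then x
    else scanB (if pmax < x then x else pmax) xs bs

def findmiddleelem_alt (arr : List Int) : Int :=
  if arr.length < 3 then -1
  else
    let mid := PySem.List.slice arr (some 1) (some ((arr.length : Int) - 1))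
    scanB (PySem.List.pyGetD arr 0 0) mid (okAux mid).1

-- ===== PRECONDITION & SPEC =====
-- "j is a valid middle candidate of c :: ms (last element of the original array already removed from ms):
--  ≥ the head c and everything before it, ≤ everything after it"
abbrev pvQual (c : Int) (ms : List Int) (j : Nat) : Prop :=
  j < ms.length ∧ c ≤ ms.getD j 0 ∧ (∀ i, i < j → ms.getD i 0 ≤ ms.getD j 0) ∧
    (∀ k, k < ms.length → j < k → ms.getD j 0 ≤ ms.getD k 0)

abbrev pvDiff (c : Int) (ms : List Int) : Prop :=
  ∃ j, j < ms.length ∧ pvQual c ms j ∧ ms.getD j 0 = -1 ∧ (∀ i, i < j → ¬ pvQual c ms i) ∧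
    ∃ k, k < ms.length ∧ pvQual c ms k ∧ ms.getD k 0 ≠ -1

-- On arrays whose FIRST valid middle candidate equals -1 while a later valid candidate is ≠ -1,
-- A's use of -1 as its not-found sentinel makes it overlook the -1 candidate and return the later
-- candidate, whereas B returns -1, the genuinely first valid candidate — the intended first match.
def D_findmiddleelem (arr : List Int) : Prop :=
  3 ≤ arr.length ∧ pvDiff arr.headI arr.tail.dropLast

instance (arr : List Int) : Decidable (D_findmiddleelem arr) := by
  unfold D_findmiddleelem; infer_instance

def Spec_findmiddleelem (arr : List Int) (out : Int) : Prop :=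
  ¬ D_findmiddleelem arr → out = findmiddleelem_alt arr
instance (arr : List Int) (out : Int) : Decidable (Spec_findmiddleelem arr out) := by
  unfold Spec_findmiddleelem; infer_instance

def pvDiffWitness_findmiddleelem : List Int := [-2, -1, 3, 5]
def pvDiffWitnessOut_findmiddleelem : Int × Int := (3, -1)

-- ===== CLAIM (what is proved, stated in full; the proofs are below) =====
def Claim_unchanged_findmiddleelem : Prop :=
  ∀ (arr : List Int), Dom_findmiddleelem arr → Spec_findmiddleelem arr (findmiddleelem arr)
def Claim_changed_findmiddleelem : Prop :=
  Dom_findmiddleelem (pvDiffWitness_findmiddleelem) ∧ D_findmiddleelem (pvDiffWitness_findmiddleelem) ∧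
  findmiddleelem (pvDiffWitness_findmiddleelem) = pvDiffWitnessOut_findmiddleelem.1 ∧
  findmiddleelem_alt (pvDiffWitness_findmiddleelem) = pvDiffWitnessOut_findmiddleelem.2 ∧
  pvDiffWitnessOut_findmiddleelem.1 ≠ pvDiffWitnessOut_findmiddleelem.2
def Claim_exact_findmiddleelem : Prop :=
  ∀ (arr : List Int), Dom_findmiddleelem arr → D_findmiddleelem arr →
    findmiddleelem arr ≠ findmiddleelem_alt arr

-- ===== LEMMAS AND PROOFS =====

-- the loop body of A's port, named for the proofs (definitionally the lambda in the port); n = len(arr)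
def stepA (n : Int) (st : Int × Int) (p : Int × Int) : Int × Int :=
  if p.1 = 0 ∨ p.1 = n - 1 then (st.1, p.2)
  else if st.2 ≤ p.2 then (if st.1 = -1 then p.2 else st.1, p.2)
  else if p.2 < st.1 then (-1, st.2)
  else st

-- reference form of A's middle-of-the-array loop (state (req_elem, curr_max))
def foldAP : Int → Int → List Int → Int × Int
  | r, c, [] => (r, c)
  | r, c, x :: rest =>
    if c ≤ x then foldAP (if r = -1 then x else r) x rest
    else if x < r then foldAP (-1) c rest
    else foldAP r c rest

-- reference form of what A computes on the middles: first candidate whose value is not the sentinel -1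
def skipScan (c : Int) : List Int → Int
  | [] => -1
  | x :: rest =>
    if c ≤ x then
      (if (∀ z ∈ rest, x ≤ z) ∧ x ≠ -1 then x else skipScan x rest)
    else skipScan c rest

-- reference form of what B computes on the middles: first candidate
def altScan (c : Int) : List Int → Int
  | [] => -1
  | x :: rest =>
    if c ≤ x then
      (if ∀ z ∈ rest, x ≤ z then x else altScan x rest)
    else altScan c rest

lemma foldAP_keep (ms : List Int) : ∀ r c, r ≠ -1 → (∀ z ∈ ms, r ≤ z) → (foldAP r c ms).1 = r := by
  induction ms with
  | nil => intro r c _ _; rfl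
  | cons x rest ih =>
    intro r c hr hall
    have hx : r ≤ x := hall x (by simp)
    have hrest : ∀ z ∈ rest, r ≤ z := fun z hz => hall z (by simp [hz])
    by_cases h1 : c ≤ x
    · rw [show foldAP r c (x :: rest) = foldAP r x rest from by simp [foldAP, h1, hr]]
      exact ih r x hr hrest
    · have hx2 : ¬ x < r := by omega
      rw [show foldAP r c (x :: rest) = foldAP r c rest from by simp [foldAP, h1, hx2]]
      exact ih r c hr hrest

lemma foldAP_skipScan (ms : List Int) :
    (∀ c, (foldAP (-1) c ms).1 = skipScan c ms) ∧
    (∀ r c, r ≠ -1 → r ≤ c → (∃ z ∈ ms, z < r) → (foldAP r c ms).1 = skipScan c ms) := by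
  induction ms with
  | nil =>
    refine ⟨fun c => rfl, ?_⟩
    rintro r c _ _ ⟨z, hz, _⟩; cases hz
  | cons x rest ih =>
    constructor
    · intro c
      by_cases hcx : c ≤ x
      · rw [show foldAP (-1) c (x :: rest) = foldAP x x rest from by simp [foldAP, hcx]]
        by_cases hx1 : x = -1
        · subst hx1
          rw [show skipScan c ((-1 : Int) :: rest) = skipScan (-1) rest from by simp [skipScan, hcx]]
          exact ih.1 (-1)
        · by_cases hall : ∀ z ∈ rest, x ≤ z
          · rw [show skipScan c (x :: rest) = if (∀ z ∈ rest, x ≤ z) ∧ x ≠ -1 then x else skipScan x rest from by rw [skipScan, if_pos hcx], if_pos ⟨hall, hx1⟩]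
            exact foldAP_keep rest x x hx1 hall
          · rw [show skipScan c (x :: rest) = skipScan x rest from by simp [skipScan, hcx, hall]]
            push_neg at hall
            obtain ⟨z, hz, hlt⟩ := hall
            exact ih.2 x x hx1 le_rfl ⟨z, hz, hlt⟩
      · rw [show foldAP (-1) c (x :: rest) = foldAP (-1) c rest from by simp [foldAP, hcx]]
        rw [show skipScan c (x :: rest) = skipScan c rest from by simp [skipScan, hcx]]
        exact ih.1 c
    · rintro r c hr hrc ⟨z, hz, hzr⟩
      by_cases hcx : c ≤ x
      · have hzrest : z ∈ rest := by
          rcases List.mem_cons.1 hz with h | h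
          · exfalso; omega
          · exact h
        have hncond : ¬ ((∀ z ∈ rest, x ≤ z) ∧ x ≠ -1) := fun hc => by
          have := hc.1 z hzrest; omega
        rw [show foldAP r c (x :: rest) = foldAP r x rest from by simp [foldAP, hcx, hr]]
        rw [show skipScan c (x :: rest) = skipScan x rest from by simp [skipScan, hcx, hncond]]
        exact ih.2 r x hr (by omega) ⟨z, hzrest, hzr⟩
      · rw [show skipScan c (x :: rest) = skipScan c rest from by simp [skipScan, hcx]]
        by_cases hxr : x < r
        · rw [show foldAP r c (x :: rest) = foldAP (-1) c rest from by simp [foldAP, hcx, hxr]]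
          exact ih.1 c
        · have hzrest : z ∈ rest := by
            rcases List.mem_cons.1 hz with h | h
            · exfalso; omega
            · exact h
          rw [show foldAP r c (x :: rest) = foldAP r c rest from by simp [foldAP, hcx, hxr]]
          exact ih.2 r c hr hrc ⟨z, hzrest, hzr⟩

lemma qual_zero (c x : Int) (rest : List Int) :
    pvQual c (x :: rest) 0 ↔ c ≤ x ∧ ∀ z ∈ rest, x ≤ z := by
  constructor
  · rintro ⟨-, hc, -, hsuf⟩
    refine ⟨by simpa using hc, ?_⟩
    intro z hz
    obtain ⟨k, hk, rfl⟩ := List.mem_iff_getElem.1 hz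
    have := hsuf (k + 1) (by simpa using hk) (by omega)
    simpa [List.getD_eq_getElem, hk] using this
  · rintro ⟨hc, hall⟩
    refine ⟨by simp, by simpa using hc, by omega, ?_⟩
    intro k hk hpos
    match k, hpos with
    | k + 1, _ =>
      have hk' : k < rest.length := by simpa using hk
      have : (x :: rest).getD (k + 1) 0 = rest[k] := by
        simp [hk']
      rw [List.getD_cons_zero, this]
      exact hall _ (List.getElem_mem hk')

lemma qual_shift (c x : Int) (rest : List Int) (j : Nat) :
    pvQual c (x :: rest) (j + 1) ↔ pvQual (max c x) rest j := by
  have hval : (x :: rest).getD (j + 1) 0 = rest.getD j 0 := rfl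
  constructor
  · rintro ⟨h1, hc, hpre, hsuf⟩
    rw [hval] at hc hpre hsuf
    refine ⟨by simpa using h1, ?_, ?_, ?_⟩
    · have hx := hpre 0 (by omega)
      simp only [List.getD_cons_zero] at hx
      exact max_le hc hx
    · intro i hi
      have := hpre (i + 1) (by omega)
      simpa using this
    · intro k hk hjk
      have := hsuf (k + 1) (by simpa using hk) (by omega)
      simpa using this
  · rintro ⟨h1, hc, hpre, hsuf⟩
    refine ⟨by simpa using h1, ?_, ?_, ?_⟩
    · rw [hval]; exact le_trans (le_max_left _ _) hc
    · intro i hi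
      match i with
      | 0 => simpa [hval] using le_trans (le_max_right _ _) hc
      | i + 1 =>
        have := hpre i (by omega)
        simpa [hval] using this
    · intro k hk hjk
      match k, hjk with
      | k + 1, _ =>
        have := hsuf k (by simpa using hk) (by omega)
        simpa [hval] using this

lemma diff_shift (c x : Int) (rest : List Int) (h0 : ¬ pvQual c (x :: rest) 0) :
    pvDiff (max c x) rest → pvDiff c (x :: rest) := by
  rintro ⟨j, hj, hq, hv, hfirst, k, hk, hqk, hvk⟩
  refine ⟨j + 1, by simpa using hj, (qual_shift c x rest j).2 hq, hv, ?_,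
    k + 1, by simpa using hk, (qual_shift c x rest k).2 hqk, hvk⟩
  intro i hi
  match i with
  | 0 => exact h0
  | i + 1 =>
    intro hq'
    exact hfirst i (by omega) ((qual_shift c x rest i).1 hq')

lemma skipScan_none (ms : List Int) :
    ∀ c, (∀ k, k < ms.length → pvQual c ms k → ms.getD k 0 = -1) → skipScan c ms = -1 := by
  induction ms with
  | nil => intro c _; rfl
  | cons x rest ih =>
    intro c hyp
    have hshift : ∀ k, k < rest.length → pvQual (max c x) rest k → rest.getD k 0 = -1 := by
      intro k hk hq
      exact hyp (k + 1) (by simpa using hk) ((qual_shift c x rest k).2 hq)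
    by_cases hcx : c ≤ x
    · have hmax : max c x = x := max_eq_right hcx
      rw [hmax] at hshift
      by_cases hall : ∀ z ∈ rest, x ≤ z
      · have hq0 : pvQual c (x :: rest) 0 := (qual_zero c x rest).2 ⟨hcx, hall⟩
        have hx1 : x = -1 := by simpa using hyp 0 (by simp) hq0
        simp only [skipScan]
        rw [if_pos hcx, if_neg (by simp [hx1])]
        exact ih x hshift
      · simp only [skipScan]
        rw [if_pos hcx, if_neg (fun hc => hall hc.1)]
        exact ih x hshift
    · have hmax : max c x = c := max_eq_left (by omega)
      rw [hmax] at hshift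
      simp only [skipScan]
      rw [if_neg hcx]
      exact ih c hshift

lemma skipScan_altScan (ms : List Int) :
    ∀ c, ¬ pvDiff c ms → skipScan c ms = altScan c ms := by
  induction ms with
  | nil => intro c _; rfl
  | cons x rest ih =>
    intro c hnd
    by_cases hcx : c ≤ x
    · by_cases hall : ∀ z ∈ rest, x ≤ z
      · have hq0 : pvQual c (x :: rest) 0 := (qual_zero c x rest).2 ⟨hcx, hall⟩
        by_cases hx1 : x = -1
        · -- alt returns x = -1; skip recurses but every later qualifier must be -1
          simp only [skipScan, altScan]
          rw [if_pos hcx, if_pos hcx, if_neg (by simp [hx1]), if_pos hall]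
          subst hx1
          apply skipScan_none
          intro k hk hq
          by_contra hne
          exact hnd ⟨0, by simp, hq0, by simp, by omega,
            k + 1, by simpa using hk,
            (qual_shift c (-1) rest k).2 (by simpa [max_eq_right hcx] using hq), by simpa using hne⟩
        · simp only [skipScan, altScan]
          rw [if_pos hcx, if_pos hcx, if_pos ⟨hall, hx1⟩, if_pos hall]
      · have h0 : ¬ pvQual c (x :: rest) 0 := fun hq =>
          hall (((qual_zero c x rest).1 hq).2)
        simp only [skipScan, altScan]
        rw [if_pos hcx, if_pos hcx, if_neg (fun hc => hall hc.1), if_neg hall]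
        have hmax : max c x = x := max_eq_right hcx
        exact ih x (fun hd => hnd (diff_shift c x rest h0 (by rwa [hmax])))
    · have h0 : ¬ pvQual c (x :: rest) 0 := fun hq =>
        hcx (((qual_zero c x rest).1 hq).1)
      simp only [skipScan, altScan]
      rw [if_neg hcx, if_neg hcx]
      have hmax : max c x = c := max_eq_left (by omega)
      exact ih c (fun hd => hnd (diff_shift c x rest h0 (by rwa [hmax])))

lemma altScan_first_neg (ms : List Int) :
    ∀ c j, pvQual c ms j → ms.getD j 0 = -1 → (∀ i, i < j → ¬ pvQual c ms i) →
    altScan c ms = -1 := by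
  induction ms with
  | nil => intro c j hq _ _; exact absurd hq.1 (by simp)
  | cons x rest ih =>
    intro c j hq hv hfirst
    match j with
    | 0 =>
      obtain ⟨hcx, hall⟩ := (qual_zero c x rest).1 hq
      simp only [altScan]
      rw [if_pos hcx, if_pos hall]
      simpa using hv
    | j + 1 =>
      have h0 : ¬ pvQual c (x :: rest) 0 := hfirst 0 (by omega)
      have hq' := (qual_shift c x rest j).1 hq
      have hfirst' : ∀ i, i < j → ¬ pvQual (max c x) rest i := fun i hi hqi =>
        hfirst (i + 1) (by omega) ((qual_shift c x rest i).2 hqi)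
      by_cases hcx : c ≤ x
      · have hnall : ¬ ∀ z ∈ rest, x ≤ z := fun hall => h0 ((qual_zero c x rest).2 ⟨hcx, hall⟩)
        simp only [altScan]
        rw [if_pos hcx, if_neg hnall]
        exact ih x j (by rwa [max_eq_right hcx] at hq') hv
          (by rw [max_eq_right hcx] at hfirst'; exact hfirst')
      · simp only [altScan]
        rw [if_neg hcx]
        have hmax : max c x = c := max_eq_left (by omega)
        exact ih c j (by rwa [hmax] at hq') hv (by rw [hmax] at hfirst'; exact hfirst')

lemma skipScan_ne_neg (ms : List Int) :
    ∀ c k, pvQual c ms k → ms.getD k 0 ≠ -1 → skipScan c ms ≠ -1 := by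
  induction ms with
  | nil => intro c k hq _; exact absurd hq.1 (by simp)
  | cons x rest ih =>
    intro c k hq hv
    by_cases hcx : c ≤ x
    · by_cases hcond : (∀ z ∈ rest, x ≤ z) ∧ x ≠ -1
      · simp only [skipScan]
        rw [if_pos hcx, if_pos hcond]
        exact hcond.2
      · simp only [skipScan]
        rw [if_pos hcx, if_neg hcond]
        match k with
        | 0 =>
          exfalso
          obtain ⟨_, hall⟩ := (qual_zero c x rest).1 hq
          have hx1 : x ≠ -1 := by simpa using hv
          exact hcond ⟨hall, hx1⟩
        | k + 1 =>
          have hq' := (qual_shift c x rest k).1 hq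
          exact ih x k (by rwa [max_eq_right hcx] at hq') hv
    · simp only [skipScan]
      rw [if_neg hcx]
      match k with
      | 0 =>
        exact absurd (((qual_zero c x rest).1 hq).1) hcx
      | k + 1 =>
        have hq' := (qual_shift c x rest k).1 hq
        have hmax : max c x = c := max_eq_left (by omega)
        exact ih c k (by rwa [hmax] at hq') hv

lemma okAux_min (l : List Int) : ∀ x w, w ≤ (okAux (x :: l)).2 ↔ w ≤ x ∧ ∀ z ∈ l, w ≤ z := by
  induction l with
  | nil => intro x w; simp [okAux]
  | cons y rest ih =>
    intro x w
    simp only [okAux]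
    constructor
    · intro h
      split_ifs at h with hxy
      · have h2 : w ≤ (okAux (y :: rest)).2 := by omega
        obtain ⟨hy, hrest⟩ := (ih y w).1 h2
        exact ⟨h, by intro z hz; rcases List.mem_cons.1 hz with rfl | hz; exact hy; exact hrest z hz⟩
      · obtain ⟨hy, hrest⟩ := (ih y w).1 h
        refine ⟨by omega, ?_⟩
        intro z hz; rcases List.mem_cons.1 hz with rfl | hz
        · exact hy
        · exact hrest z hz
    · rintro ⟨hx, hall⟩
      have h2 : w ≤ (okAux (y :: rest)).2 :=
        (ih y w).2 ⟨hall y (by simp), fun z hz => hall z (by simp [hz])⟩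
      split_ifs <;> omega

lemma scanB_altScan (ms : List Int) (h : ms ≠ []) :
    ∀ c, scanB c ms (okAux ms).1 = altScan c ms := by
  induction ms with
  | nil => exact absurd rfl h
  | cons x rest ih =>
    intro c
    match rest with
    | [] =>
      simp only [okAux, scanB, altScan]
      by_cases hcx : c ≤ x
      · rw [if_pos ⟨hcx, by simp⟩, if_pos hcx, if_pos (by simp)]
      · rw [if_neg (fun hc => hcx hc.1), if_neg hcx]
    | y :: rest' =>
      have hflag : (okAux (x :: y :: rest')).1 = (decide (x ≤ (okAux (y :: rest')).2)) :: (okAux (y :: rest')).1 := rfl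
      rw [hflag]
      by_cases hcx : c ≤ x
      · by_cases hall : ∀ z ∈ y :: rest', x ≤ z
        · have hdec : x ≤ (okAux (y :: rest')).2 :=
            (okAux_min rest' y x).2 ⟨hall y (by simp), fun z hz => hall z (by simp [hz])⟩
          simp only [scanB, altScan]
          rw [if_pos ⟨hcx, by simpa using hdec⟩, if_pos hcx, if_pos hall]
        · have hdec : ¬ x ≤ (okAux (y :: rest')).2 := fun hle => by
            obtain ⟨hy, hrest⟩ := (okAux_min rest' y x).1 hle
            exact hall (by intro z hz; rcases List.mem_cons.1 hz with rfl | hz; exact hy; exact hrest z hz)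
          simp only [scanB, altScan]
          rw [if_neg (fun hc => hdec (by simpa using hc.2)), if_pos hcx, if_neg hall]
          rw [show (if c < x then x else c) = x from by omega]
          exact ih (by simp) x
      · simp only [scanB, altScan]
        rw [if_neg (fun hc => hcx hc.1), if_neg hcx]
        rw [show (if c < x then x else c) = c from by omega]
        exact ih (by simp) c

lemma foldMid (n : Int) (ms : List Int) :
    ∀ (s : Int) (st : Int × Int), 1 ≤ s → s + ms.length ≤ n - 1 →
    (PySem.List.enumerate ms s).foldl (stepA n) st = foldAP st.1 st.2 ms := by
  induction ms with
  | nil => intro s st _ _; rfl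
  | cons x rest ih =>
    intro s st hs hle
    rw [PySem.List.enumerate_cons, List.foldl_cons]
    have hlen : (0 : Int) ≤ rest.length := by positivity
    simp only [List.length_cons] at hle
    push_cast at hle
    have hcond : ¬ ((s, x).1 = 0 ∨ (s, x).1 = n - 1) := by
      simp only []
      omega
    have hstep : stepA n st (s, x) =
        (if st.2 ≤ x then (if st.1 = -1 then x else st.1, x)
         else if x < st.1 then (-1, st.2) else st) := by
      rw [stepA, if_neg hcond]
    rw [hstep]
    by_cases h1 : st.2 ≤ x
    · rw [if_pos h1, ih (s + 1) _ (by omega) (by omega)]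
      simp only [foldAP]
      rw [if_pos h1]
    · rw [if_neg h1]
      by_cases h2 : x < st.1
      · rw [if_pos h2, ih (s + 1) _ (by omega) (by omega)]
        simp only [foldAP]
        rw [if_neg h1, if_pos h2]
      · rw [if_neg h2, ih (s + 1) _ (by omega) (by omega)]
        simp only [foldAP]
        rw [if_neg h1, if_neg h2]

lemma glueA' (c t : Int) (ms : List Int) :
    findmiddleelem (c :: (ms ++ [t])) = (foldAP (-1) c ms).1 := by
  have hn : ((c :: (ms ++ [t])).length : Int) = (ms.length : Int) + 2 := by
    simp; omega
  rw [show findmiddleelem (c :: (ms ++ [t])) =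
      ((PySem.List.enumerate (c :: (ms ++ [t])) 0).foldl
        (stepA ((c :: (ms ++ [t])).length : Int)) (-1, -1)).1 from rfl]
  rw [PySem.List.enumerate_cons, List.foldl_cons,
      PySem.List.enumerate_append, List.foldl_append]
  rw [show stepA ((c :: (ms ++ [t])).length : Int) (-1, -1) (0, c) = (-1, c) from by
    rw [stepA, if_pos (Or.inl rfl)]]
  rw [foldMid _ ms (0 + 1) (-1, c) (by norm_num) (by rw [hn]; omega)]
  rw [PySem.List.enumerate_cons]
  simp only [List.foldl_cons, List.foldl_nil, PySem.List.enumerate_nil]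
  rw [show stepA ((c :: (ms ++ [t])).length : Int) (foldAP (-1) c ms) (0 + 1 + ms.length, t)
      = ((foldAP (-1) c ms).1, t) from by
    rw [stepA]
    exact if_pos (Or.inr (by rw [hn]; omega))]

lemma glueA (c : Int) (rest : List Int) (h : 2 ≤ rest.length) :
    findmiddleelem (c :: rest) = skipScan c rest.dropLast := by
  have hne : rest ≠ [] := by intro h0; subst h0; simp at h
  conv_lhs => rw [← List.dropLast_append_getLast hne]
  rw [glueA' c (rest.getLast hne) rest.dropLast]
  exact (foldAP_skipScan rest.dropLast).1 c

lemma glueB (c : Int) (rest : List Int) (h : 2 ≤ rest.length) :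
    findmiddleelem_alt (c :: rest) = altScan c rest.dropLast := by
  have hlen : (c :: rest).length = rest.length + 1 := by simp
  rw [findmiddleelem_alt]
  rw [if_neg (by simp; omega)]
  have hcast : ((c :: rest).length : Int) - 1 = ((rest.length : Nat) : Int) := by
    simp
  rw [hcast]
  have hslice : PySem.List.slice (c :: rest) (some 1) (some ((rest.length : Nat) : Int)) = rest.dropLast := by
    have := PySem.List.slice_natCast (c :: rest) 1 rest.length
    rw [show ((1 : Nat) : Int) = (1 : Int) from rfl] at this
    rw [this]
    simp only [List.drop_succ_cons, List.drop_zero]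
    rw [List.dropLast_eq_take]
  rw [hslice]
  have hget : PySem.List.pyGetD (c :: rest) 0 0 = c := by
    simp [pysem]
  rw [hget]
  exact scanB_altScan _ (by
    intro h0
    have := congrArg List.length h0
    rw [List.length_dropLast] at this
    simp at this
    omega) c

lemma small_eq (arr : List Int) (h : arr.length < 3) :
    findmiddleelem arr = -1 ∧ findmiddleelem_alt arr = -1 := by
  match arr with
  | [] => exact ⟨rfl, rfl⟩
  | [a] =>
    constructor
    · show (stepA 1 (-1, -1) (0, a)).1 = -1
      rw [stepA, if_pos (Or.inl rfl)]
    · rfl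
  | [a, b] =>
    constructor
    · show (stepA 2 (stepA 2 (-1, -1) (0, a)) (1, b)).1 = -1
      rw [show stepA 2 ((-1 : Int), (-1 : Int)) (0, a) = (-1, a) from by rw [stepA, if_pos (Or.inl rfl)]]
      rw [show stepA 2 ((-1 : Int), a) (1, b) = (-1, b) from by
        rw [stepA]; exact if_pos (Or.inr (by norm_num))]
    · rfl
  | a :: b :: c :: rest =>
    exfalso; simp at h; omega

-- ===== VERDICT (by name: the statement is the Claim_ definition above) =====
theorem findmiddleelem_spec : Claim_unchanged_findmiddleelem := by
  intro arr _ hD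
  by_cases hlen : arr.length < 3
  · obtain ⟨h1, h2⟩ := small_eq arr hlen; rw [h1, h2]
  · match arr, hlen with
    | c :: rest, hlen =>
      have hr : 2 ≤ rest.length := by simp at hlen ⊢; omega
      have hnd : ¬ pvDiff c rest.dropLast := fun hd => hD ⟨by simpa using hr, hd⟩
      rw [glueA c rest hr, glueB c rest hr, skipScan_altScan _ _ hnd]

theorem findmiddleelem_changed : Claim_changed_findmiddleelem := by
  unfold Claim_changed_findmiddleelem; decide

theorem findmiddleelem_tight : Claim_exact_findmiddleelem := by
  intro arr _ hD
  match arr, hD with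
  | c :: rest, ⟨hr3, j, hj, hq, hv, hfirst, k, hk, hqk, hvk⟩ =>
    have hr : 2 ≤ rest.length := by simpa using hr3
    simp only [List.headI, List.tail_cons] at hq hv hfirst hqk hvk
    rw [glueA c rest hr, glueB c rest hr]
    rw [altScan_first_neg _ _ _ hq hv hfirst]
    exact skipScan_ne_neg _ _ _ hqk hvk
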